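-- pv_equiv track=rewrite | github.com/khylo/CourseNotes | ai/nlp/1_Classification+VectorSpaces/4_machineTranslation/hashes_multiplanes.py | basic_hash_table
-- ===== SOURCE A (Python) =====
-- def basic_hash_table(value_l, n_buckets):
--
--     def hash_function(value, n_buckets): # mod #buckets
--         return int(value) % n_buckets
--
--     hash_table = {i:[] for i in range(n_buckets)} # Initialize all the buckets in the hash table as empty lists
--
--     for value in value_l:
--         hash_value = hash_function(value,n_buckets) # Get the hash key for the given value
--         hash_table[hash_value].append(value) # Add the element to the corresponding bucket
--
--     return hash_table
-- ===== SOURCE B (Python) =====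
-- def basic_hash_table(value_l, n_buckets):
--     # One filter pass per bucket instead of a single distribution pass.
--     return {i: [v for v in value_l if int(v) % n_buckets == i]
--             for i in range(n_buckets)}
-- ===== Notes on version B (the rewrite author's own statement) =====
-- stated objective: alternative
-- what changed: B builds each bucket by its own filtering scan of value_l (a dict comprehension over bucket indices) instead of A's single distribution pass that appends into pre-initialized buckets.
import Mathlib
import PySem

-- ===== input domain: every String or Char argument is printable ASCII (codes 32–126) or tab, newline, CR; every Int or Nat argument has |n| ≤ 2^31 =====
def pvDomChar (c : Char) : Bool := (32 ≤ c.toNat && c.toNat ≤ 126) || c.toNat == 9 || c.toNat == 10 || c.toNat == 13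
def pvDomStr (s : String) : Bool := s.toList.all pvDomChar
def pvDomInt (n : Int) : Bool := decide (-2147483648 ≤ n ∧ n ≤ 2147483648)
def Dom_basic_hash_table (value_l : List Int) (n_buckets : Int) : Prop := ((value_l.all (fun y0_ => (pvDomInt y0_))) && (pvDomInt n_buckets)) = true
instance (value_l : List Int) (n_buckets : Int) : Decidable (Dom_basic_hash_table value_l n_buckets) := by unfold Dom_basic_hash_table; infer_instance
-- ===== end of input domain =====

-- B groups by one filter pass per bucket instead of A's single distribution pass; same result on Pre_ (return values only).

-- ===== PORT A =====
-- hash_table = {i:[] for i in range(n_buckets)}; for value in value_l: hash_table[int(value) % n_buckets].append(value)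
def basic_hash_table (value_l : List Int) (n_buckets : Int) : List (Int × List Int) :=
  let init : PySem.Dict Int (List Int) :=
    (PySem.List.pyRange 0 n_buckets 1).foldl (fun d i => d.insert i ([] : List Int)) PySem.Dict.empty
  let tbl :=
    value_l.foldl (fun d v => d.modify (PySem.Int.mod v n_buckets) [] (fun xs => xs ++ [v])) init
  tbl.items

-- ===== PORT B =====
-- {i: [v for v in value_l if int(v) % n_buckets == i] for i in range(n_buckets)}
def basic_hash_table_alt (value_l : List Int) (n_buckets : Int) : List (Int × List Int) :=
  (PySem.List.pyRange 0 n_buckets 1).map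
    (fun i => (i, value_l.filter (fun v => PySem.Int.mod v n_buckets == i)))

-- ===== PRECONDITION & SPEC =====
-- Pre_ excludes n_buckets ≤ 0 with nonempty value_l: there A raises (ZeroDivisionError/KeyError) on the first value.
def Pre_basic_hash_table (value_l : List Int) (n_buckets : Int) : Prop :=
  0 < n_buckets ∨ value_l = []
instance (value_l : List Int) (n_buckets : Int) : Decidable (Pre_basic_hash_table value_l n_buckets) := by unfold Pre_basic_hash_table; infer_instance

def pvWitness_basic_hash_table : List Int × Int := ([3, 4, 7, -1], 3)

def Spec_basic_hash_table (value_l : List Int) (n_buckets : Int) (out : List (Int × List Int)) : Prop := out = basic_hash_table_alt value_l n_buckets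
instance (value_l : List Int) (n_buckets : Int) (out : List (Int × List Int)) : Decidable (Spec_basic_hash_table value_l n_buckets out) := by unfold Spec_basic_hash_table; infer_instance

-- ===== CLAIM (what is proved, stated in full; the proofs are below) =====
def Claim_equal_basic_hash_table : Prop := ∀ (value_l : List Int) (n_buckets : Int), Dom_basic_hash_table value_l n_buckets → Pre_basic_hash_table value_l n_buckets → Spec_basic_hash_table value_l n_buckets (basic_hash_table value_l n_buckets)

-- ===== LEMMAS AND PROOFS =====

-- the initial dict {i:[] for i in range n} as a literal
theorem init_items (n : Int) :
    ((PySem.List.pyRange 0 n 1).foldl (fun d i => d.insert i ([] : List Int)) PySem.Dict.empty)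
      = PySem.Dict.mk ((PySem.List.pyRange 0 n 1).map (fun i => (i, ([] : List Int)))) := by
  apply PySem.Dict.ext
  have h := PySem.Dict.items_foldl_insert_fresh (l := PySem.List.pyRange 0 n 1)
    (k := fun i => i) (v := fun _ => ([] : List Int)) (d := PySem.Dict.empty)
    (by intro a _; simp [PySem.Dict.contains_empty])
    (by simpa using PySem.List.nodup_pyRange_one 0 n)
  simpa [PySem.Dict.empty] using h

theorem getD_mk_nil (xs : List Int) (c : Int) :
    (PySem.Dict.mk (xs.map (fun i => (i, ([] : List Int))))).getD c [] = [] := by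
  induction xs with
  | nil => simp [PySem.Dict.getD_eq_get?_getD, PySem.Dict.get?]
  | cons x t ih =>
      rw [List.map_cons, PySem.Dict.getD_eq_get?_getD, PySem.Dict.get?_mk_cons]
      split
      · rfl
      · rw [← PySem.Dict.getD_eq_get?_getD]; exact ih

-- the distribution loop, read per key
theorem getD_loop (n : Int) (l : List Int) (d : PySem.Dict Int (List Int)) (c : Int) :
    (l.foldl (fun d v => d.modify (PySem.Int.mod v n) [] (fun xs => xs ++ [v])) d).getD c []
      = d.getD c [] ++ l.filter (fun v => PySem.Int.mod v n == c) := by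
  induction l generalizing d with
  | nil => simp
  | cons x t ih =>
      simp only [List.foldl_cons, List.filter_cons]
      rw [ih]
      by_cases hc : PySem.Int.mod x n = c
      · simp [hc]
      · simp [PySem.Dict.getD_modify, hc, Ne.symm hc]

-- ===== VERDICT (by name: the statement is the Claim_ definition above) =====
theorem basic_hash_table_spec : Claim_equal_basic_hash_table := by
  intro value_l n_buckets _ hpre
  unfold Spec_basic_hash_table basic_hash_table basic_hash_table_alt
  rcases hpre with hn | hl
  · -- 0 < n_buckets : keys of the loop result are exactly range(n_buckets)
    rw [init_items]
    have hnd : (PySem.List.pyRange 0 n_buckets 1).Nodup := PySem.List.nodup_pyRange_one 0 n_buckets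
    have hkinit : (PySem.Dict.mk ((PySem.List.pyRange 0 n_buckets 1).map (fun i => (i, ([] : List Int))))).keys
        = PySem.List.pyRange 0 n_buckets 1 := by
      simp [PySem.Dict.keys, Function.comp_def]
    have hkeys : ((value_l.foldl (fun d v => d.modify (PySem.Int.mod v n_buckets) [] (fun xs => xs ++ [v]))
          (PySem.Dict.mk ((PySem.List.pyRange 0 n_buckets 1).map (fun i => (i, ([] : List Int))))))).keys
        = PySem.List.pyRange 0 n_buckets 1 := by
      rw [PySem.Dict.keys_foldl_modify_key, hkinit]
      rw [PySem.Set.update_eq_append_filter]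
      have : (PySem.Set.ofList (value_l.map (fun v => PySem.Int.mod v n_buckets))).filter
          (fun y => !(PySem.Set.contains (PySem.List.pyRange 0 n_buckets 1) y)) = [] := by
        apply List.filter_eq_nil_iff.mpr
        intro y hy
        have hy' : y ∈ value_l.map (fun v => PySem.Int.mod v n_buckets) :=
          (PySem.Set.mem_ofList _ _).mp hy
        obtain ⟨v, _, rfl⟩ := List.mem_map.mp hy'
        simp
        exact ⟨PySem.Int.mod_nonneg v hn, PySem.Int.mod_lt v hn⟩
      rw [this, List.append_nil]
    have hndk : ((value_l.foldl (fun d v => d.modify (PySem.Int.mod v n_buckets) [] (fun xs => xs ++ [v]))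
          (PySem.Dict.mk ((PySem.List.pyRange 0 n_buckets 1).map (fun i => (i, ([] : List Int))))))).keys.Nodup := by
      rw [hkeys]; exact hnd
    rw [PySem.Dict.items_eq_map_keys _ hndk ([] : List Int), hkeys]
    apply List.map_congr_left
    intro k _
    rw [getD_loop, getD_mk_nil]
    simp
  · -- value_l = [] : both sides are built from the same empty-bucket shape
    subst hl
    rw [init_items]
    simp
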